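-- pv_equiv track=rewrite | github.com/limapvictor/backup-materias-antigas | MAC110/P2/simetrica.py | recortaBinario
-- ===== SOURCE A (Python) =====
-- def recortaBinario(M):
--     numLin,numCol = len(M),len(M[0])
--     for lin in range(numLin-1,-1,-1):
--         zerada = True
--         for col in range(numCol-1,-1,-1):
--             if(M[lin][col] == 1):
--                 zerada = False
--         if(zerada):
--             del M[lin]
--     for col in range(numCol-1,-1,-1):
--         zerada = True
--         for lin in range(len(M)-1,-1,-1):
--             if(M[lin][col] == 1):
--                 zerada = False
--         if(zerada):
--             for lin in range(len(M)):
--                 del M[lin][col]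
--     return M
-- ===== SOURCE B (Python) =====
-- def recortaBinario(M):
--     ncols = len(M[0])
--     M[:] = [row for row in M if 1 in row]
--     keep = [c for c in range(ncols) if any(row[c] == 1 for row in M)]
--     for row in M:
--         row[:] = [row[c] for c in keep]
--     return M
-- ===== Notes on version B (the rewrite author's own statement) =====
-- stated objective: simpler
-- what changed: Instead of scanning backwards with nested index loops and deleting rows/columns by index one at a time, B filters the rows once, computes the list of columns to keep once, and rebuilds each surviving row from that keep-list.
-- outside the precondition, e.g. on recortaBinario([[0], [0, 1]]): A returns [], B returns [[]]
import Mathlib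
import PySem

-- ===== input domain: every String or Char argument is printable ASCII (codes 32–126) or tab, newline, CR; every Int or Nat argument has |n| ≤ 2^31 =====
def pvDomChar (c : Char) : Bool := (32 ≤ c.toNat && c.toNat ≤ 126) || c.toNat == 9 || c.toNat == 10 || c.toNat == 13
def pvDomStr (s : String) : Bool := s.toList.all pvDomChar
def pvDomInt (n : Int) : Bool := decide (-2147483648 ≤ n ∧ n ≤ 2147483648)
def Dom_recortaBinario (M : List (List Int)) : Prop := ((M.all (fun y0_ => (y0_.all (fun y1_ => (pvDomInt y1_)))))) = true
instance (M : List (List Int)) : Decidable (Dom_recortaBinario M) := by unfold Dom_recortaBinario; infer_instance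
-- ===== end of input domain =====

-- B removes the all-zero rows and columns by computing a keep-list once and rebuilding,
-- instead of A's backwards index loops deleting in place (equivalence is about the return
-- value; both Pythons mutate M in place the same way).

-- ===== PORT A =====
def recortaBinario (M : List (List Int)) : List (List Int) :=
  let numLin : Int := M.length
  let numCol : Int := (PySem.List.pyGetD M 0 []).length
  -- first loop: delete all-zero rows, scanning lin = numLin-1 .. 0
  let M1 := (PySem.List.pyRange (numLin - 1) (-1) (-1)).foldl (fun acc lin =>
    let zerada := (PySem.List.pyRange (numCol - 1) (-1) (-1)).foldl (fun z col =>
      if PySem.List.pyGetD (PySem.List.pyGetD acc lin []) col 0 == 1 then false else z) true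
    if zerada then acc.eraseIdx lin.toNat else acc) M
  -- second loop: delete all-zero columns, scanning col = numCol-1 .. 0
  (PySem.List.pyRange (numCol - 1) (-1) (-1)).foldl (fun acc col =>
    let zerada := (PySem.List.pyRange ((acc.length : Int) - 1) (-1) (-1)).foldl (fun z lin =>
      if PySem.List.pyGetD (PySem.List.pyGetD acc lin []) col 0 == 1 then false else z) true
    if zerada then
      (PySem.List.pyRange 0 (acc.length : Int) 1).foldl (fun a lin =>
        a.modify lin.toNat (fun row => row.eraseIdx col.toNat)) acc
    else acc) M1

-- ===== PORT B =====
def recortaBinario_alt (M : List (List Int)) : List (List Int) :=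
  let ncols : Int := (PySem.List.pyGetD M 0 []).length
  let rows := M.filter (fun r => r.contains 1)
  let keep := (PySem.List.pyRange 0 ncols 1).filter (fun c =>
    rows.any (fun r => PySem.List.pyGetD r c 0 == 1))
  rows.map (fun r => keep.map (fun c => PySem.List.pyGetD r c 0))

-- ===== PRECONDITION & SPEC =====
-- Pre_ restricts to the natural domain — nonempty rectangular matrices: A raises IndexError
-- on empty M and on rows shorter than row 0, and a ragged row longer than row 0 is malformed
-- input on which A silently ignores entries beyond len(M[0]).
def Pre_recortaBinario (M : List (List Int)) : Prop :=
  M ≠ [] ∧ ∀ r ∈ M, r.length = (PySem.List.pyGetD M 0 []).length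
instance (M : List (List Int)) : Decidable (Pre_recortaBinario M) := by
  unfold Pre_recortaBinario; infer_instance
def pvWitness_recortaBinario : List (List Int) := [[0, 1], [0, 0]]

def Spec_recortaBinario (M : List (List Int)) (out : List (List Int)) : Prop := out = recortaBinario_alt M
instance (M : List (List Int)) (out : List (List Int)) : Decidable (Spec_recortaBinario M out) := by unfold Spec_recortaBinario; infer_instance

-- ===== CLAIM (what is proved, stated in full; the proofs are below) =====
def Claim_equal_recortaBinario : Prop := ∀ (M : List (List Int)), Dom_recortaBinario M → Pre_recortaBinario M → Spec_recortaBinario M (recortaBinario M)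


-- ===== LEMMAS AND PROOFS =====

-- columns (in increasing order, as B computes them) that still contain a 1 in the rows R
def pvKeep (R : List (List Int)) (a b : Int) : List Int :=
  (PySem.List.pyRange a b 1).filter (fun c => R.any (fun r' => PySem.List.pyGetD r' c 0 == 1))

-- state of one row after the column loop has processed columns ≥ k
def pvRow (R : List (List Int)) (numCol : Nat) (k : Nat) (r : List Int) : List Int :=
  r.take k ++ (pvKeep R (k : Int) (numCol : Int)).map (fun c => PySem.List.pyGetD r c 0)

-- a fold that turns the flag off whenever f fires computes "init && no element satisfies f"
theorem pv_zscan {alpha : Type} (f : alpha -> Bool) :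
    forall (L : List alpha) (b : Bool),
      L.foldl (fun z c => if f c then false else z) b = (b && !(L.any f)) := by
  intro L
  induction L with
  | nil => intro b; simp
  | cons c L ih =>
    intro b
    simp only [List.foldl_cons, List.any_cons, ih]
    cases hc : f c <;> simp

-- A's backwards index scan "zerada" over a whole list computes "no element satisfies f"
theorem pv_scanList {alpha : Type} (xs : List alpha) (f : alpha -> Bool) (d : alpha) :
    (PySem.List.pyRange ((xs.length : Int) - 1) (-1) (-1)).foldl
      (fun z i => if f (PySem.List.pyGetD xs i d) then false else z) true
    = !(xs.any f) := by
  rw [pv_zscan]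
  have h : PySem.List.pyRange ((xs.length : Int) - 1) (-1) (-1)
      = (PySem.List.pyRange 0 ((xs.length : Int)) 1).reverse := by
    rw [PySem.List.pyRange_neg_one_eq_reverse]; norm_num
  rw [h, List.any_reverse, Bool.true_and]
  congr 1
  calc (PySem.List.pyRange 0 ((xs.length : Int)) 1).any (fun i => f (PySem.List.pyGetD xs i d))
      = ((PySem.List.pyRange 0 ((xs.length : Int)) 1).map (fun i => PySem.List.pyGetD xs i d)).any f := by
        rw [List.any_map]; rfl
    _ = xs.any f := by rw [PySem.List.map_pyGetD_pyRange_zero']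

-- list.modify at the length of the left part of an append
theorem pv_modify_append {alpha : Type} (pre : List alpha) (z : alpha) (zs : List alpha) (f : alpha -> alpha) :
    (pre ++ z :: zs).modify pre.length f = pre ++ f z :: zs := by
  induction pre with
  | nil => simp
  | cons x pre ih => simpa using ih

-- backwards index-deletion over a prefix = filter of that prefix
theorem pv_delPass (g : List Int -> Bool) :
    forall (ys zs : List (List Int)),
      (PySem.List.pyRange ((ys.length : Int) - 1) (-1) (-1)).foldl
        (fun acc lin =>
          if g (PySem.List.pyGetD acc lin []) then acc.eraseIdx lin.toNat else acc)
        (ys ++ zs)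
      = ys.filter (fun r => !(g r)) ++ zs := by
  intro ys
  induction ys using List.reverseRecOn with
  | nil => intro zs; simp [PySem.List.pyRange_neg_one_eq_nil]
  | append_singleton ys y ih =>
    intro zs
    rw [show (((ys ++ [y]).length : Int)) - 1 = (ys.length : Int) by simp,
        PySem.List.pyRange_neg_one_cons (by omega)]
    rw [List.append_assoc, List.singleton_append, List.foldl_cons]
    have hget : PySem.List.pyGetD (ys ++ y :: zs) ((ys.length : Int)) [] = y := by
      rw [PySem.List.pyGetD_natCast, List.getD_eq_getElem?_getD,
          List.getElem?_append_right (le_refl _)]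
      simp
    by_cases hg : g y
    · have herase : (ys ++ y :: zs).eraseIdx ((ys.length : Int)).toNat = ys ++ zs := by
        rw [Int.toNat_natCast, List.eraseIdx_append_of_length_le (le_refl _)]
        simp
      simp only [hget, hg, if_true, herase, ih zs]
      simp [List.filter_append, hg]
    · simp only [hget, hg, Bool.false_eq_true, if_false]
      rw [ih (y :: zs)]
      simp [List.filter_append, hg]

-- a fold of modify over range(pre.length, pre.length + zs.length) rewrites the zs part by f
theorem pv_modfold {alpha : Type} (f : alpha -> alpha) :
    forall (zs pre : List alpha),
      (PySem.List.pyRange ((pre.length : Int)) ((pre.length : Int) + (zs.length : Int)) 1).foldl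
        (fun a lin => a.modify lin.toNat f) (pre ++ zs)
      = pre ++ zs.map f := by
  intro zs
  induction zs with
  | nil => intro pre; simp [PySem.List.pyRange_one_eq_nil]
  | cons z zs ih =>
    intro pre
    rw [show ((pre.length : Int)) + (((z :: zs).length : Int))
          = ((pre.length : Int) + 1) + (zs.length : Int) by push_cast [List.length_cons]; omega]
    rw [PySem.List.pyRange_one_cons (by omega), List.foldl_cons]
    have hstep : (pre ++ z :: zs).modify ((pre.length : Int)).toNat f = pre ++ f z :: zs := by
      rw [Int.toNat_natCast, pv_modify_append]
    rw [hstep]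
    have h2 := ih (pre ++ [f z])
    have e1 : (((pre ++ [f z]).length : Int)) = (pre.length : Int) + 1 := by simp
    rw [e1, List.append_assoc, List.singleton_append] at h2
    rw [show ((pre.length : Int) + 1) + (zs.length : Int)
          = ((pre.length : Int) + 1) + (zs.length : Int) from rfl] at h2 ⊢
    rw [h2]
    simp

-- the column-deletion loop, processing columns k-1 .. 0
theorem pv_colfold (R : List (List Int)) (numCol : Nat)
    (hR : forall r, r ∈ R -> r.length = numCol) :
    forall (k : Nat), k ≤ numCol ->
      (PySem.List.pyRange ((k : Int) - 1) (-1) (-1)).foldl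
        (fun acc col =>
          let zerada := (PySem.List.pyRange ((acc.length : Int) - 1) (-1) (-1)).foldl
            (fun z lin =>
              if PySem.List.pyGetD (PySem.List.pyGetD acc lin []) col 0 == 1 then false else z) true
          if zerada then
            (PySem.List.pyRange 0 (acc.length : Int) 1).foldl (fun a lin =>
              a.modify lin.toNat (fun row => row.eraseIdx col.toNat)) acc
          else acc)
        (R.map (pvRow R numCol k))
      = R.map (pvRow R numCol 0) := by
  intro k
  induction k with
  | zero => intro _; simp [PySem.List.pyRange_neg_one_eq_nil]
  | succ k ih =>
    intro hk
    have hk' : k ≤ numCol := Nat.le_of_succ_le hk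
    have hklt : k < numCol := hk
    rw [show (((k + 1 : Nat) : Int)) - 1 = ((k : Nat) : Int) by push_cast; ring,
        PySem.List.pyRange_neg_one_cons (by omega), List.foldl_cons]
    -- the element of a processed row at column k is still the original entry
    have hrowget : forall r, r ∈ R ->
        PySem.List.pyGetD (pvRow R numCol (k + 1) r) ((k : Nat) : Int) 0
          = PySem.List.pyGetD r ((k : Nat) : Int) 0 := by
      intro r hr
      have hlen : r.length = numCol := hR r hr
      have htk : (r.take (k + 1)).length = k + 1 := by
        rw [List.length_take]; omega
      rw [pvRow, PySem.List.pyGetD_natCast, PySem.List.pyGetD_natCast,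
          List.getD_eq_getElem?_getD, List.getD_eq_getElem?_getD,
          List.getElem?_append_left (by omega)]
      rw [List.getElem?_take]
      simp
    -- the zerada flag of this step
    have hz : (PySem.List.pyRange (((R.map (pvRow R numCol (k + 1))).length : Int) - 1) (-1) (-1)).foldl
        (fun z lin =>
          if PySem.List.pyGetD (PySem.List.pyGetD (R.map (pvRow R numCol (k + 1))) lin []) ((k : Nat) : Int) 0 == 1
          then false else z) true
        = !(R.any (fun r' => PySem.List.pyGetD r' ((k : Nat) : Int) 0 == 1)) := by
      rw [pv_scanList (R.map (pvRow R numCol (k + 1)))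
            (fun row => PySem.List.pyGetD row ((k : Nat) : Int) 0 == 1) []]
      rw [List.any_map]
      congr 1
      apply PySem.List.any_congr_mem
      intro r hr
      simp only [Function.comp]
      rw [hrowget r hr]
    by_cases hp : R.any (fun r' => PySem.List.pyGetD r' ((k : Nat) : Int) 0 == 1)
    · -- column k is kept: the step does nothing, and pvRow (k+1) = pvRow k already
      have hkeep : pvKeep R (((k : Nat) : Int)) (((numCol : Nat) : Int))
          = ((k : Nat) : Int) :: pvKeep R (((k : Nat) : Int) + 1) (((numCol : Nat) : Int)) := by
        rw [pvKeep, pvKeep, PySem.List.pyRange_one_cons (by exact_mod_cast hklt)]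
        simp only [List.filter_cons]
        rw [if_pos hp]
      have hnostep : R.map (pvRow R numCol (k + 1)) = R.map (pvRow R numCol k) := by
        apply List.map_congr_left
        intro r hr
        have hlen : r.length = numCol := hR r hr
        simp only [pvRow]
        rw [show (((k + 1 : Nat)) : Int) = ((k : Nat) : Int) + 1 by push_cast; ring]
        conv_rhs => rw [hkeep]
        rw [List.map_cons, List.take_add_one,
            show r[k]? = some r[k] from List.getElem?_eq_getElem (by omega)]
        simp only [Option.toList_some]
        rw [List.append_assoc, List.singleton_append]
        congr 2
        rw [PySem.List.pyGetD_natCast, List.getD_eq_getElem?_getD,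
            List.getElem?_eq_getElem (show k < r.length by omega)]
        rfl
      simp only [hz, hp, Bool.not_true]
      rw [if_neg (by simp), hnostep]
      exact ih hk'
    · -- column k is all zero: the step erases index k from every row
      have hbfold : (PySem.List.pyRange 0 (((R.map (pvRow R numCol (k + 1))).length : Int)) 1).foldl
          (fun a lin => a.modify lin.toNat (fun row => row.eraseIdx (((k : Nat) : Int)).toNat))
          (R.map (pvRow R numCol (k + 1)))
          = (R.map (pvRow R numCol (k + 1))).map (fun row => row.eraseIdx (((k : Nat) : Int)).toNat) := by
        have h3 := pv_modfold (fun row => row.eraseIdx (((k : Nat) : Int)).toNat)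
          (R.map (pvRow R numCol (k + 1))) []
        simpa using h3
      have hkeep : pvKeep R (((k : Nat) : Int)) (((numCol : Nat) : Int))
          = pvKeep R (((k : Nat) : Int) + 1) (((numCol : Nat) : Int)) := by
        rw [pvKeep, pvKeep, PySem.List.pyRange_one_cons (by exact_mod_cast hklt)]
        simp only [List.filter_cons]
        rw [if_neg hp]
      have herase : (R.map (pvRow R numCol (k + 1))).map (fun row => row.eraseIdx (((k : Nat) : Int)).toNat)
          = R.map (pvRow R numCol k) := by
        rw [List.map_map]
        apply List.map_congr_left
        intro r hr
        have hlen : r.length = numCol := hR r hr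
        have htk : (r.take k).length = k := by rw [List.length_take]; omega
        simp only [Function.comp, Int.toNat_natCast, pvRow]
        rw [show (((k + 1 : Nat)) : Int) = ((k : Nat) : Int) + 1 by push_cast; ring]
        rw [List.take_add_one,
            show r[k]? = some r[k] from List.getElem?_eq_getElem (by omega)]
        simp only [Option.toList_some]
        rw [List.append_assoc, List.singleton_append,
            List.eraseIdx_append_of_length_le (le_of_eq htk), htk]
        rw [show (k - k) = 0 by omega, List.eraseIdx_cons_zero]
        rw [hkeep]
      simp only [hz, hp, Bool.not_false]
      rw [if_pos (by simp), hbfold, herase]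
      exact ih hk'

-- ===== VERDICT (by name: the statement is the Claim_ definition above) =====
theorem recortaBinario_spec : Claim_equal_recortaBinario := by
  intro M _ hPre
  obtain ⟨hne, hrect⟩ := hPre
  unfold Spec_recortaBinario recortaBinario recortaBinario_alt
  simp only []
  -- row phase: backwards deletion = filter
  have hrow := pv_delPass
    (fun row => (PySem.List.pyRange (((PySem.List.pyGetD M 0 []).length : Int) - 1) (-1) (-1)).foldl
      (fun z col => if PySem.List.pyGetD row col 0 == 1 then false else z) true) M []
  rw [List.append_nil, List.append_nil] at hrow
  rw [hrow]
  -- the filter predicate is "the row contains a 1"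
  have hfilter : M.filter (fun r =>
      !((PySem.List.pyRange (((PySem.List.pyGetD M 0 []).length : Int) - 1) (-1) (-1)).foldl
        (fun z col => if PySem.List.pyGetD r col 0 == 1 then false else z) true))
      = M.filter (fun r => r.contains 1) := by
    apply List.filter_congr
    intro r hr
    rw [show (((PySem.List.pyGetD M 0 []).length : Int)) = ((r.length : Int)) by
          exact_mod_cast (hrect r hr).symm]
    rw [pv_scanList r (fun x => x == 1) 0, Bool.not_not, List.contains_eq_any_beq]
    apply PySem.List.any_congr_mem
    intro x _
    exact Bool.beq_comm
  rw [hfilter]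
  -- column phase
  have hR : forall r, r ∈ M.filter (fun r => r.contains 1) ->
      r.length = (PySem.List.pyGetD M 0 []).length := by
    intro r hr
    exact hrect r (List.mem_of_mem_filter hr)
  have hinit : M.filter (fun r => r.contains 1)
      = (M.filter (fun r => r.contains 1)).map
          (pvRow (M.filter (fun r => r.contains 1)) (PySem.List.pyGetD M 0 []).length
            (PySem.List.pyGetD M 0 []).length) := by
    conv_lhs => rw [show M.filter (fun r => r.contains 1)
        = (M.filter (fun r => r.contains 1)).map id from (List.map_id _).symm]
    apply List.map_congr_left
    intro r hr
    rw [id, pvRow, pvKeep, PySem.List.pyRange_one_eq_nil (le_refl _)]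
    simp [List.take_of_length_le (le_of_eq (hR r hr))]
  conv_lhs => rw [hinit]
  rw [pv_colfold (M.filter (fun r => r.contains 1)) ((PySem.List.pyGetD M 0 []).length) hR
        ((PySem.List.pyGetD M 0 []).length) (le_refl _)]
  -- both sides are rows rebuilt from the keep-list
  apply List.map_congr_left
  intro r hr
  rw [pvRow, List.take_zero, List.nil_append, pvKeep]
  norm_num
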